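-- pv_equiv track=rewrite | github.com/MarkusShepherd/literumi | literumi/binary.py | spell
-- ===== SOURCE A (Python) =====
-- def spell(number):
--     '''spell out a number in binary'''
--
--     if number < 0:
--         return 'minus ' + spell(-number)
--
--     if number == 0:
--         return 'zero'
--
--     parts = []
--
--     while number:
--         high, low = divmod(number, 2)
--         parts.append('one' if low else 'zero')
--         number = high
--
--     return ' '.join(reversed(parts))
-- ===== SOURCE B (Python) =====
-- def spell(number):
--     '''spell out a number in binary'''
--     if number == 0:
--         return 'zero'
--     prefix = 'minus ' if number < 0 else ''
--     n = abs(number)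
--     return prefix + ' '.join(
--         'one' if (n >> i) & 1 else 'zero'
--         for i in range(n.bit_length() - 1, -1, -1))
-- ===== Notes on version B (the rewrite author's own statement) =====
-- stated objective: alternative
-- what changed: Replaces A's recursive minus-handling plus divmod accumulate-then-reverse loop with a non-recursive version: abs and bit_length, then a single MSB-first pass of bit tests over a descending range, with no list accumulator and no reversal.
import Mathlib
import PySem

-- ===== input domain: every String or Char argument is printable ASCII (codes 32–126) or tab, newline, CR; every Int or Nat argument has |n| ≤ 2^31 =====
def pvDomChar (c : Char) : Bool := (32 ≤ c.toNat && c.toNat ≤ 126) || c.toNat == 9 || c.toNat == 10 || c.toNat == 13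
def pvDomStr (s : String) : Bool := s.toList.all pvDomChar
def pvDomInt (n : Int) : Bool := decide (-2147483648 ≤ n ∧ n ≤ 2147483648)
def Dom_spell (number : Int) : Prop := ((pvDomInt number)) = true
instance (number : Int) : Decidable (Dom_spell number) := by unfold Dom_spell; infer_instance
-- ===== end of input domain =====

-- B replaces A's recursive minus-handling and divmod accumulate-then-reverse loop with a
-- non-recursive abs/bit_length version doing one MSB-first pass of bit tests — alternative, same cost.


-- ===== PORT A =====
-- A's while-loop; it is only entered with number > 0, so its state is carried as a Nat
-- (for n ≥ 0, Python's divmod(n, 2) is exactly (n / 2, n % 2) on Nat).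
def spellLoopA (n : Nat) (parts : List String) : List String :=
  if n = 0 then parts
  else spellLoopA (n / 2) (parts ++ [if n % 2 ≠ 0 then "one" else "zero"])
termination_by n
decreasing_by exact Nat.div_lt_self (Nat.pos_of_ne_zero (by assumption)) (by norm_num)

def spell (number : Int) : String :=
  if number < 0 then "minus " ++ spell (-number)
  else if number = 0 then "zero"
  else PySem.Str.join " " ((spellLoopA number.toNat []).reverse)
termination_by (if number < 0 then 1 else 0 : Nat)
decreasing_by simp_all; omega

-- ===== PORT B =====
-- n.bit_length() for n ≥ 0 (number of binary digits of n).
def bitLen (n : Nat) : Nat :=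
  if n = 0 then 0 else bitLen (n / 2) + 1
termination_by n
decreasing_by exact Nat.div_lt_self (Nat.pos_of_ne_zero (by assumption)) (by norm_num)

def spell_alt (number : Int) : String :=
  if number = 0 then "zero"
  else
    let pre := if number < 0 then "minus " else ""
    let n := number.natAbs
    pre ++ PySem.Str.join " "
      ((PySem.List.pyRange ((bitLen n : Int) - 1) (-1) (-1)).map
        (fun i => if (n >>> i.toNat) &&& 1 ≠ 0 then "one" else "zero"))

-- ===== PRECONDITION & SPEC =====
def Spec_spell (number : Int) (out : String) : Prop := out = spell_alt number
instance (number : Int) (out : String) : Decidable (Spec_spell number out) := by unfold Spec_spell; infer_instance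

-- ===== CLAIM (what is proved, stated in full; the proofs are below) =====
def Claim_equal_spell : Prop := ∀ (number : Int), Dom_spell number → Spec_spell number (spell number)

-- ===== LEMMAS AND PROOFS =====
lemma spellLoopA_append (n : Nat) (parts : List String) :
    spellLoopA n parts = parts ++ spellLoopA n [] := by
  induction n using Nat.strong_induction_on generalizing parts with
  | _ n ih =>
    conv_lhs => rw [spellLoopA]
    conv_rhs => rw [spellLoopA]
    by_cases h : n = 0
    · simp [h]
    · have hlt := Nat.div_lt_self (Nat.pos_of_ne_zero h) (by norm_num : 1 < 2)
      simp only [h, if_false]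
      conv_rhs => rw [List.nil_append, ih (n / 2) hlt]
      rw [ih (n / 2) hlt]
      simp

-- A's LSB-first word list is the map of bit tests over indices 0 … bitLen n - 1.
lemma spellLoopA_eq_map_range (n : Nat) :
    spellLoopA n [] = (List.range (bitLen n)).map
      (fun k => if (n >>> k) &&& 1 ≠ 0 then "one" else "zero") := by
  induction n using Nat.strong_induction_on with
  | _ n ih =>
    by_cases h : n = 0
    · rw [spellLoopA, bitLen]; simp [h]
    · have hlt := Nat.div_lt_self (Nat.pos_of_ne_zero h) (by norm_num : 1 < 2)
      rw [spellLoopA]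
      simp only [h, if_false, List.nil_append]
      rw [spellLoopA_append, ih (n / 2) hlt]
      conv_rhs => rw [bitLen]
      simp only [h, if_false, List.range_succ_eq_map, List.map_cons, List.map_map]
      rw [List.singleton_append]
      congr 1
      · simp [Nat.shiftRight_zero, Nat.and_one_is_mod]
      · apply List.map_congr_left
        intro a _
        have hsh : n >>> (a + 1) = (n / 2) >>> a := by
          simp [Nat.shiftRight_eq_div_pow, Nat.div_div_eq_div_mul, pow_succ, Nat.mul_comm]
        simp [Function.comp, hsh]

-- the descending index range, mapped, is the reverse of the ascending map
lemma map_pyRange_desc (b : Nat) (f : Nat → String) :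
    (PySem.List.pyRange ((b : Int) - 1) (-1) (-1)).map (fun i => f i.toNat)
      = ((List.range b).map f).reverse := by
  rw [PySem.List.pyRange_neg_one]
  have hb : ((b : Int) - 1 - -1).toNat = b := by omega
  rw [hb, List.map_map]
  apply List.ext_getElem
  · simp
  · intro k h1 h2
    have hk : k < b := by simpa using h1
    simp only [List.getElem_map, List.getElem_range, List.getElem_reverse,
      List.length_map, List.length_range, Function.comp]
    congr 1
    omega

lemma spell_pos (n : Int) (hn : 0 < n) :
    spell n = PySem.Str.join " "
      ((PySem.List.pyRange ((bitLen n.natAbs : Int) - 1) (-1) (-1)).map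
        (fun i => if (n.natAbs >>> i.toNat) &&& 1 ≠ 0 then "one" else "zero")) := by
  rw [spell]
  have h1 : ¬ n < 0 := by omega
  have h2 : n ≠ 0 := by omega
  simp only [h1, h2, if_false]
  have hnt : n.toNat = n.natAbs := by omega
  rw [map_pyRange_desc (bitLen n.natAbs)
        (fun k => if (n.natAbs >>> k) &&& 1 ≠ 0 then "one" else "zero"),
      hnt, spellLoopA_eq_map_range]

-- ===== VERDICT (by name: the statement is the Claim_ definition above) =====
theorem spell_spec : Claim_equal_spell := by
  intro n _
  unfold Spec_spell spell_alt
  by_cases h0 : n = 0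
  · rw [spell]; simp [h0]
  · simp only [h0, if_false]
    by_cases hneg : n < 0
    · simp only [hneg, if_true]
      rw [spell]
      simp only [hneg, if_true]
      rw [spell_pos (-n) (by omega)]
      rw [Int.natAbs_neg]
    · simp only [hneg, if_false]
      rw [spell_pos n (by omega)]
      simp
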